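-- pv_equiv track=rewrite | github.com/jgbaldwinbrown/jgbutils | Baldwin-Brown_2017_Scripts/revision_scripts/assorted_converters/sync2baypass.py | get_alt_col
-- ===== SOURCE A (Python) =====
-- def get_alt_col(colcounts, refcol):
--     largest = -1
--     largestval = -1
--     second = -1
--     secondval = -1
--     for i, count in enumerate(colcounts):
--         if count > largestval:
--             secondval = largestval
--             second = largest
--             largestval = count
--             largest = i
--         elif count > secondval:
--             secondval = count
--             second = i
--     if largest == refcol:
--         return(second)
--     else:
--         return(largest)
-- ===== SOURCE B (Python) =====
-- def get_alt_col(colcounts, refcol):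
--     pairs = sorted(((count, i) for i, count in enumerate(colcounts)),
--                    key=lambda p: (-p[0], p[1]))
--     largest = pairs[0][1] if pairs else -1
--     second = pairs[1][1] if len(pairs) > 1 else -1
--     return second if largest == refcol else largest
-- ===== Notes on version B (the rewrite author's own statement) =====
-- stated objective: alternative
-- what changed: Replaces the single-pass top-two tracking scan (with -1 sentinels) by decorating all columns as (count, index) pairs, sorting them by (-count, index), and reading the top-two indices off positions 0 and 1 of the sorted list.
-- intended difference: On lists where fewer than two counts are nonnegative and a negative count would be ranked (all counts negative on a list that is not a single column named by refcol, or exactly one nonnegative count at the column refcol with some negative count present), A's -1 sentinel initialisation silently ignores the negative counts and returns -1, while B ranks all columns uniformly and returns the index of the best remaining column, which is the intended alt-allele column. — e.g. on get_alt_col([-5], 3): A returns -1, B returns 0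
import Mathlib
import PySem

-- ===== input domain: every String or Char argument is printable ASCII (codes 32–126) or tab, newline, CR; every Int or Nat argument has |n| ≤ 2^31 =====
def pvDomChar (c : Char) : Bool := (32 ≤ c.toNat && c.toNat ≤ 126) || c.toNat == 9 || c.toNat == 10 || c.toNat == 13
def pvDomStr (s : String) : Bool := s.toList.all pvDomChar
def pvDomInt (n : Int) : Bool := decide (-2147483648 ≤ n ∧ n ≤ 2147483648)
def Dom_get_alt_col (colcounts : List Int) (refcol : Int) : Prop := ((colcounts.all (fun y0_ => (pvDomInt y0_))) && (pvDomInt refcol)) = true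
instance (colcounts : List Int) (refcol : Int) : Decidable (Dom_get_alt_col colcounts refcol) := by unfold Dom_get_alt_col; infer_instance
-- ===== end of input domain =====

-- B replaces A's one-pass top-two scan with a sort of all (count, index) pairs by
-- (-count, index) and reads the top two indices off the sorted list (alternative
-- decomposition, not faster); on the D_ corner (fewer than two nonnegative counts
-- with negatives present, see D_) B ranks negative counts where A's -1 sentinel skips them.


-- ===== PORT A =====
-- literal transliteration of A: a left fold over enumerate(colcounts) carrying
-- (largest, largestval, second, secondval), then the final refcol branch
def get_alt_col (colcounts : List Int) (refcol : Int) : Int :=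
  let st := (PySem.List.enumerate colcounts 0).foldl
    (fun (st : Int × Int × Int × Int) (p : Int × Int) =>
      if p.2 > st.2.1 then (p.1, p.2, st.1, st.2.1)
      else if p.2 > st.2.2.2 then (st.1, st.2.1, p.1, p.2)
      else st)
    (-1, -1, -1, -1)
  if st.1 = refcol then st.2.2.1 else st.1

-- ===== PORT B =====
-- literal transliteration of B: sort all (count, i) pairs by key (-count, i),
-- take the indices at positions 0 and 1 (default -1), same final branch
def get_alt_col_alt (colcounts : List Int) (refcol : Int) : Int :=
  let pairs := PySem.List.sorted2
    ((PySem.List.enumerate colcounts 0).map (fun p => (p.2, p.1)))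
    (fun p => -p.1) (fun p => p.2)
  let largest := match pairs[0]? with | some p => p.2 | none => -1
  let second := match pairs[1]? with | some p => p.2 | none => -1
  if largest = refcol then second else largest

-- ===== PRECONDITION & SPEC =====
-- On lists with fewer than two nonnegative counts where a negative count would be ranked
-- (all counts negative, unless the list is a single column named by refcol; or exactly one
-- nonnegative count sitting at column refcol with some negative count present), A's -1
-- sentinel initialisation ignores the negative counts and returns -1, while B ranks all
-- columns uniformly and returns the index of the best remaining column, the intended
-- alt-allele column.
def D_get_alt_col (colcounts : List Int) (refcol : Int) : Prop :=
  (∃ c ∈ colcounts, c < 0) ∧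
  (∀ k : Nat, k < colcounts.length → 0 ≤ colcounts[k]! → refcol = (k : Int)) ∧
  ¬(colcounts.length = 1 ∧ refcol = 0)
instance (colcounts : List Int) (refcol : Int) : Decidable (D_get_alt_col colcounts refcol) := by unfold D_get_alt_col; infer_instance

def Spec_get_alt_col (colcounts : List Int) (refcol : Int) (out : Int) : Prop := ¬ D_get_alt_col colcounts refcol → out = get_alt_col_alt colcounts refcol
instance (colcounts : List Int) (refcol : Int) (out : Int) : Decidable (Spec_get_alt_col colcounts refcol out) := by unfold Spec_get_alt_col; infer_instance

def pvDiffWitness_get_alt_col : List Int × Int := ([-5], 3)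
def pvDiffWitnessOut_get_alt_col : Int × Int := (-1, 0)

-- ===== CLAIM (what is proved, stated in full; the proofs are below) =====
def Claim_unchanged_get_alt_col : Prop := ∀ (colcounts : List Int) (refcol : Int), Dom_get_alt_col colcounts refcol → Spec_get_alt_col colcounts refcol (get_alt_col colcounts refcol)
def Claim_changed_get_alt_col : Prop := Dom_get_alt_col (pvDiffWitness_get_alt_col.1) (pvDiffWitness_get_alt_col.2) ∧ D_get_alt_col (pvDiffWitness_get_alt_col.1) (pvDiffWitness_get_alt_col.2) ∧ get_alt_col (pvDiffWitness_get_alt_col.1) (pvDiffWitness_get_alt_col.2) = pvDiffWitnessOut_get_alt_col.1 ∧ get_alt_col_alt (pvDiffWitness_get_alt_col.1) (pvDiffWitness_get_alt_col.2) = pvDiffWitnessOut_get_alt_col.2 ∧ pvDiffWitnessOut_get_alt_col.1 ≠ pvDiffWitnessOut_get_alt_col.2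
def Claim_exact_get_alt_col : Prop := ∀ (colcounts : List Int) (refcol : Int), Dom_get_alt_col colcounts refcol → D_get_alt_col colcounts refcol → get_alt_col colcounts refcol ≠ get_alt_col_alt colcounts refcol

-- ===== LEMMAS AND PROOFS =====

-- A's loop step and scan; the filtered/negative/full decorated pair lists and their sorts
def pvStep (st : Int × Int × Int × Int) (p : Int × Int) : Int × Int × Int × Int :=
  if p.2 > st.2.1 then (p.1, p.2, st.1, st.2.1)
  else if p.2 > st.2.2.2 then (st.1, st.2.1, p.1, p.2)
  else st

def pvScan (xs : List Int) : Int × Int × Int × Int :=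
  (PySem.List.enumerate xs 0).foldl pvStep (-1, -1, -1, -1)

def pvPairs (xs : List Int) : List (Int × Int) :=
  ((PySem.List.enumerate xs 0).filter (fun p => p.2 > -1)).map (fun p => (p.2, p.1))

def pvNegPairs (xs : List Int) : List (Int × Int) :=
  ((PySem.List.enumerate xs 0).filter (fun p => ¬ p.2 > -1)).map (fun p => (p.2, p.1))

def pvBefore (a b : Int × Int) : Bool :=
  decide (b.1 < a.1) || (!decide (a.1 < b.1) && decide (a.2 < b.2))

def pvSorted (xs : List Int) : List (Int × Int) :=
  PySem.List.sorted2 (pvPairs xs) (fun p => -p.1) (fun p => p.2)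

def pvNegSorted (xs : List Int) : List (Int × Int) :=
  PySem.List.sorted2 (pvNegPairs xs) (fun p => -p.1) (fun p => p.2)

def pvAll (xs : List Int) : List (Int × Int) :=
  PySem.List.sorted2 ((PySem.List.enumerate xs 0).map (fun p => (p.2, p.1)))
    (fun p => -p.1) (fun p => p.2)

lemma pvScan_snoc (xs : List Int) (x : Int) :
    pvScan (xs ++ [x]) = pvStep (pvScan xs) ((xs.length : Int), x) := by
  simp [pvScan, PySem.List.enumerate_append, PySem.List.enumerate_cons, PySem.List.enumerate_nil,
        List.foldl_append]

lemma pvSorted_snoc_pos (xs : List Int) (x : Int) (h : x > -1) :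
    pvSorted (xs ++ [x]) = PySem.List.insertBy pvBefore (x, (xs.length : Int)) (pvSorted xs) := by
  simp [pvSorted, pvPairs, PySem.List.enumerate_append, PySem.List.enumerate_cons,
    PySem.List.enumerate_nil, List.filter_append, h, PySem.List.sorted2, List.foldl_append]
  rfl

lemma pvSorted_snoc_neg (xs : List Int) (x : Int) (h : ¬ x > -1) :
    pvSorted (xs ++ [x]) = pvSorted xs := by
  simp [pvSorted, pvPairs, PySem.List.enumerate_append, PySem.List.enumerate_cons,
    PySem.List.enumerate_nil, List.filter_append, h, PySem.List.sorted2]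

lemma pvNegSorted_snoc_pos (xs : List Int) (x : Int) (h : x > -1) :
    pvNegSorted (xs ++ [x]) = pvNegSorted xs := by
  simp [pvNegSorted, pvNegPairs, PySem.List.enumerate_append, PySem.List.enumerate_cons,
    PySem.List.enumerate_nil, List.filter_append, h, PySem.List.sorted2]

lemma pvNegSorted_snoc_neg (xs : List Int) (x : Int) (h : ¬ x > -1) :
    pvNegSorted (xs ++ [x]) = PySem.List.insertBy pvBefore (x, (xs.length : Int)) (pvNegSorted xs) := by
  simp [pvNegSorted, pvNegPairs, PySem.List.enumerate_append, PySem.List.enumerate_cons,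
    PySem.List.enumerate_nil, List.filter_append, (by omega : x ≤ -1), PySem.List.sorted2,
    List.foldl_append]
  rfl

lemma pvAll_snoc (xs : List Int) (x : Int) :
    pvAll (xs ++ [x]) = PySem.List.insertBy pvBefore (x, (xs.length : Int)) (pvAll xs) := by
  simp [pvAll, PySem.List.enumerate_append, PySem.List.enumerate_cons,
    PySem.List.enumerate_nil, PySem.List.sorted2, List.foldl_append]
  rfl

lemma pvInsert_nil (q : Int × Int) : PySem.List.insertBy pvBefore q [] = [q] := by
  simp [PySem.List.insertBy]

lemma pvInsert_cons_true (q a : Int × Int) (t : List (Int × Int)) (h : pvBefore q a = true) :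
    PySem.List.insertBy pvBefore q (a :: t) = q :: a :: t := by
  simp [PySem.List.insertBy, h]

lemma pvInsert_cons_false (q a : Int × Int) (t : List (Int × Int)) (h : pvBefore q a = false) :
    PySem.List.insertBy pvBefore q (a :: t) = a :: PySem.List.insertBy pvBefore q t := by
  simp [PySem.List.insertBy, h]

lemma mem_pvSorted (xs : List Int) (p : Int × Int) (hp : p ∈ pvSorted xs) :
    -1 < p.1 ∧ 0 ≤ p.2 ∧ p.2 < (xs.length : Int) := by
  have hp' := (PySem.List.sorted2_perm _ _ _ _).mem_iff.mp hp
  simp only [pvPairs, List.mem_map, List.mem_filter] at hp'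
  obtain ⟨q, ⟨hq, hgt⟩, rfl⟩ := hp'
  rw [PySem.List.mem_enumerate_iff] at hq
  obtain ⟨k, hk, rfl⟩ := hq
  refine ⟨by simpa using hgt, by simp, by simpa using hk⟩

lemma mem_pvNegSorted (xs : List Int) (p : Int × Int) (hp : p ∈ pvNegSorted xs) :
    p.1 ≤ -1 ∧ 0 ≤ p.2 ∧ p.2 < (xs.length : Int) := by
  have hp' := (PySem.List.sorted2_perm _ _ _ _).mem_iff.mp hp
  simp only [pvNegPairs, List.mem_map, List.mem_filter] at hp'
  obtain ⟨q, ⟨hq, hgt⟩, rfl⟩ := hp'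
  rw [PySem.List.mem_enumerate_iff] at hq
  obtain ⟨k, hk, rfl⟩ := hq
  refine ⟨by simpa using hgt, by simp, by simpa using hk⟩

-- the new pair (x, n) carries an index larger than every index in the list, so the
-- lexicographic comparator against list elements degenerates to the count comparison
lemma pvBefore_new (x n : Int) (p : Int × Int) (h : p.2 < n) :
    pvBefore (x, n) p = decide (p.1 < x) := by
  simp only [pvBefore]
  have : ¬ (n < p.2) := by omega
  by_cases hc : p.1 < x <;> simp [hc, this]

lemma pvInsert_append_of_after (q : Int × Int) (A B : List (Int × Int))
    (h : ∀ b ∈ B, pvBefore q b = true) :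
    PySem.List.insertBy pvBefore q (A ++ B) = PySem.List.insertBy pvBefore q A ++ B := by
  induction A with
  | nil =>
    cases B with
    | nil => simp [pvInsert_nil]
    | cons b t => simp [pvInsert_nil, pvInsert_cons_true q b t (h b (by simp))]
  | cons a t ih =>
    by_cases ha : pvBefore q a = true
    · simp [pvInsert_cons_true _ _ _ ha]
    · rw [List.cons_append, pvInsert_cons_false _ _ _ (by simpa using ha),
        pvInsert_cons_false _ _ _ (by simpa using ha), ih]
      simp

lemma pvInsert_append_of_before (q : Int × Int) (A B : List (Int × Int))
    (h : ∀ a ∈ A, pvBefore q a = false) :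
    PySem.List.insertBy pvBefore q (A ++ B) = A ++ PySem.List.insertBy pvBefore q B := by
  induction A with
  | nil => simp
  | cons a t ih =>
    rw [List.cons_append, pvInsert_cons_false _ _ _ (h a (by simp)), ih fun a ha => h a (by simp [ha])]
    simp

-- the full sorted pair list splits: nonnegative-count pairs (sorted) then negative ones
lemma pvAll_split (xs : List Int) : pvAll xs = pvSorted xs ++ pvNegSorted xs := by
  induction xs using List.reverseRecOn with
  | nil => rfl
  | append_singleton xs x ih =>
    rw [pvAll_snoc, ih]
    by_cases hx : x > -1
    · rw [pvSorted_snoc_pos xs x hx, pvNegSorted_snoc_pos xs x hx,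
        pvInsert_append_of_after]
      intro b hb
      have hm := mem_pvNegSorted xs b hb
      rw [pvBefore_new x _ b hm.2.2]
      simp; omega
    · rw [pvSorted_snoc_neg xs x hx, pvNegSorted_snoc_neg xs x hx,
        pvInsert_append_of_before]
      intro a ha
      have hm := mem_pvSorted xs a ha
      rw [pvBefore_new x _ a hm.2.2]
      simp; omega

lemma pvCountAux (xs : List Int) :
    List.countP (fun p => decide (p.2 > -1)) (PySem.List.enumerate xs 0) =
      List.countP (fun c => decide (0 ≤ c)) xs := by
  induction xs using List.reverseRecOn with
  | nil => rfl
  | append_singleton xs x ih =>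
    rw [PySem.List.enumerate_append, List.countP_append, List.countP_append, ih]
    simp only [PySem.List.enumerate_cons, PySem.List.enumerate_nil, List.countP_cons,
      List.countP_nil]
    by_cases hx : (0:Int) ≤ x
    · simp [hx, show ((xs.length : Int), x).2 > -1 by simp; omega]
    · simp [hx, show ¬ ((xs.length : Int), x).2 > -1 by simp; omega]

lemma pvSorted_length (xs : List Int) :
    (pvSorted xs).length = xs.countP (fun c => decide (0 ≤ c)) := by
  have h := (PySem.List.sorted2_perm (pvPairs xs) (fun p => -p.1) (fun p => p.2) false).length_eq
  rw [pvSorted, h, pvPairs, List.length_map, ← List.countP_eq_length_filter, pvCountAux]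

lemma pvNegSorted_eq_nil_iff (xs : List Int) :
    pvNegSorted xs = [] ↔ ∀ c ∈ xs, 0 ≤ c := by
  constructor
  · intro h c hc
    by_contra hneg
    obtain ⟨k, hk, rfl⟩ := List.mem_iff_getElem.mp hc
    have : ((k : Int), xs[k]) ∈ (PySem.List.enumerate xs 0).filter (fun p => ¬ p.2 > -1) := by
      rw [List.mem_filter]
      constructor
      · rw [PySem.List.mem_enumerate_iff]; exact ⟨k, hk, by simp⟩
      · simp; omega
    have hmem : (xs[k], (k : Int)) ∈ pvNegPairs xs := by
      rw [pvNegPairs, List.mem_map]; exact ⟨_, this, rfl⟩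
    have := (PySem.List.sorted2_perm (pvNegPairs xs) (fun p => -p.1) (fun p => p.2) false).symm.mem_iff.mp hmem
    rw [show PySem.List.sorted2 (pvNegPairs xs) (fun p => -p.1) (fun p => p.2) = pvNegSorted xs from rfl, h] at this
    simp at this
  · intro h
    have : pvNegPairs xs = [] := by
      rw [pvNegPairs, List.map_eq_nil_iff, List.filter_eq_nil_iff]
      intro p hp
      rw [PySem.List.mem_enumerate_iff] at hp
      obtain ⟨k, hk, rfl⟩ := hp
      have := h xs[k] (by simp)
      simp; omega
    rw [pvNegSorted, this]
    rfl

-- the invariant: A's scan state reads off positions 0 and 1 of the sorted qualifying pairs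
lemma pvInv (xs : List Int) :
    ((pvScan xs).2.1, (pvScan xs).1) = ((pvSorted xs)[0]?).getD (-1, -1) ∧
    ((pvScan xs).2.2.2, (pvScan xs).2.2.1) = ((pvSorted xs)[1]?).getD (-1, -1) := by
  induction xs using List.reverseRecOn with
  | nil => exact ⟨rfl, rfl⟩
  | append_singleton xs x ih =>
    obtain ⟨ih1, ih2⟩ := ih
    rw [pvScan_snoc]
    rcases hst : pvScan xs with ⟨l, lv, s, sv⟩
    rw [hst] at ih1 ih2
    by_cases hx : x > -1
    · rw [pvSorted_snoc_pos xs x hx]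
      have hbef : ∀ p ∈ pvSorted xs, pvBefore (x, (xs.length : Int)) p = decide (p.1 < x) :=
        fun p hp => pvBefore_new x _ p (mem_pvSorted xs p hp).2.2
      cases hL : pvSorted xs with
      | nil =>
        rw [hL] at ih1 ih2
        simp only [List.getElem?_nil, Option.getD_none, Prod.mk.injEq] at ih1 ih2
        obtain ⟨rfl, rfl⟩ := ih1
        rw [pvInsert_nil]
        simp [pvStep, hx]
      | cons a t =>
        have ha := hbef a (by rw [hL]; exact List.mem_cons_self)
        rw [hL] at ih1 ih2
        simp only [List.getElem?_cons_zero, Option.getD_some, Prod.ext_iff] at ih1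
        obtain ⟨rfl, rfl⟩ := (show lv = a.1 ∧ l = a.2 from ih1)
        by_cases hxa : a.1 < x
        · rw [pvInsert_cons_true _ _ _ (by rw [ha]; simp [hxa])]
          constructor
          · simp [pvStep, hxa]
          · simp [pvStep, hxa]
        · rw [pvInsert_cons_false _ _ _ (by rw [ha]; simp [hxa])]
          cases ht : t with
          | nil =>
            rw [ht] at ih2
            simp only [List.getElem?_cons_succ, List.getElem?_nil, Option.getD_none,
              Prod.mk.injEq] at ih2
            obtain ⟨rfl, rfl⟩ := ih2
            rw [pvInsert_nil]
            simp [pvStep, hx, (by omega : ¬ x > a.1)]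
          | cons b t' =>
            have hb := hbef b (by rw [hL, ht]; simp)
            rw [ht] at ih2
            simp only [List.getElem?_cons_succ, List.getElem?_cons_zero, Option.getD_some,
              Prod.ext_iff] at ih2
            obtain ⟨rfl, rfl⟩ := (show sv = b.1 ∧ s = b.2 from ih2)
            by_cases hxb : b.1 < x
            · rw [pvInsert_cons_true _ _ _ (by rw [hb]; simp [hxb])]
              constructor
              · simp [pvStep, hxb, (by omega : ¬ x > a.1)]
              · simp [pvStep, hxb, (by omega : ¬ x > a.1)]
            · rw [pvInsert_cons_false _ _ _ (by rw [hb]; simp [hxb])]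
              constructor
              · simp [pvStep, (by omega : ¬ x > a.1), (by omega : ¬ x > b.1)]
              · simp [pvStep, (by omega : ¬ x > a.1), (by omega : ¬ x > b.1)]
    · -- x ≤ -1: the pair is filtered out, and A's step is a no-op since largestval, secondval ≥ -1
      rw [pvSorted_snoc_neg xs x hx]
      have hlv : -1 ≤ lv := by
        cases hL : pvSorted xs with
        | nil => rw [hL] at ih1; simp only [List.getElem?_nil, Option.getD_none,
                   Prod.mk.injEq] at ih1; omega
        | cons a t =>
          have := (mem_pvSorted xs a (by rw [hL]; exact List.mem_cons_self)).1
          rw [hL] at ih1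
          simp only [List.getElem?_cons_zero, Option.getD_some, Prod.ext_iff] at ih1
          omega
      have hsv : -1 ≤ sv := by
        cases hL : pvSorted xs with
        | nil => rw [hL] at ih2; simp only [List.getElem?_nil, Option.getD_none,
                   Prod.mk.injEq] at ih2; omega
        | cons a t =>
          cases ht : t with
          | nil => rw [hL, ht] at ih2
                   simp only [List.getElem?_cons_succ, List.getElem?_nil, Option.getD_none,
                     Prod.mk.injEq] at ih2; omega
          | cons b t' =>
            have := (mem_pvSorted xs b (by rw [hL, ht]; simp)).1
            rw [hL, ht] at ih2
            simp only [List.getElem?_cons_succ, List.getElem?_cons_zero, Option.getD_some,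
              Prod.ext_iff] at ih2
            omega
      have hstep : pvStep (l, lv, s, sv) ((xs.length : Int), x) = (l, lv, s, sv) := by
        simp only [pvStep]
        split_ifs with h1 h2 <;> first | rfl | (exfalso; revert h1; simp; omega)
      rw [hstep]
      exact ⟨ih1, ih2⟩


lemma pvAll_length (xs : List Int) : (pvAll xs).length = xs.length := by
  have h := (PySem.List.sorted2_perm ((PySem.List.enumerate xs 0).map (fun p => (p.2, p.1)))
    (fun p => -p.1) (fun p => p.2) false).length_eq
  rw [pvAll, h, List.length_map, PySem.List.length_enumerate]

lemma mem_pvSorted_exists (xs : List Int) (a : Int × Int) (ha : a ∈ pvSorted xs) :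
    ∃ (k : Nat), ∃ _ : k < xs.length, a = (xs[k], (k : Int)) ∧ 0 ≤ xs[k] := by
  have hp' := (PySem.List.sorted2_perm _ _ _ false).mem_iff.mp ha
  simp only [pvPairs, List.mem_map, List.mem_filter] at hp'
  obtain ⟨q, ⟨hq, hgt⟩, rfl⟩ := hp'
  rw [PySem.List.mem_enumerate_iff] at hq
  obtain ⟨k, hk, rfl⟩ := hq
  exact ⟨k, hk, by simp, by simp at hgt ⊢; omega⟩

-- the unique nonnegative index: with countP (0 ≤ ·) = 1, a nonnegative column named by
-- refcol must be the head of pvSorted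
lemma pvUnique (xs : List Int) (a : Int × Int) (ha : a ∈ pvSorted xs)
    (hcount : xs.countP (fun c => decide (0 ≤ c)) = 1)
    (k : Nat) (hk : k < xs.length) (hpos : 0 ≤ xs[k]) : a.2 = (k : Int) := by
  have hlen : ((PySem.List.enumerate xs 0).filter (fun p => p.2 > -1)).length = 1 := by
    rw [← List.countP_eq_length_filter, pvCountAux, hcount]
  obtain ⟨z, hz⟩ := List.length_eq_one_iff.mp hlen
  -- a's preimage pair is in the filtered list
  have hamem : (a.2, a.1) ∈ (PySem.List.enumerate xs 0).filter (fun p => p.2 > -1) := by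
    have hp' := (PySem.List.sorted2_perm _ _ _ false).mem_iff.mp ha
    simp only [pvPairs, List.mem_map] at hp'
    obtain ⟨q, hq, rfl⟩ := hp'
    exact hq
  have hkmem : ((k : Int), xs[k]) ∈ (PySem.List.enumerate xs 0).filter (fun p => p.2 > -1) := by
    rw [List.mem_filter]
    refine ⟨?_, by simp; omega⟩
    rw [PySem.List.mem_enumerate_iff]
    exact ⟨k, hk, by simp⟩
  rw [hz] at hamem hkmem
  simp only [List.mem_singleton] at hamem hkmem
  exact congrArg Prod.fst (hamem.trans hkmem.symm)

-- both ports, written through the sorted pair lists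
lemma pvA_eq (xs : List Int) (r : Int) :
    get_alt_col xs r =
      (if ((pvSorted xs)[0]?.getD (-1, -1)).2 = r then ((pvSorted xs)[1]?.getD (-1, -1)).2
       else ((pvSorted xs)[0]?.getD (-1, -1)).2) := by
  obtain ⟨ih1, ih2⟩ := pvInv xs
  have e1 : (pvScan xs).1 = ((pvSorted xs)[0]?.getD (-1, -1)).2 := by rw [← ih1]
  have e2 : (pvScan xs).2.2.1 = ((pvSorted xs)[1]?.getD (-1, -1)).2 := by rw [← ih2]
  have hA : get_alt_col xs r =
      (if (pvScan xs).1 = r then (pvScan xs).2.2.1 else (pvScan xs).1) := rfl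
  rw [hA, e1, e2]

lemma pvB_eq (xs : List Int) (r : Int) :
    get_alt_col_alt xs r =
      (if ((pvAll xs)[0]?.getD (-1, -1)).2 = r then ((pvAll xs)[1]?.getD (-1, -1)).2
       else ((pvAll xs)[0]?.getD (-1, -1)).2) := by
  have hB : get_alt_col_alt xs r =
      (if (match (pvAll xs)[0]? with | some p => p.2 | none => (-1 : Int)) = r
       then (match (pvAll xs)[1]? with | some p => p.2 | none => (-1 : Int))
       else (match (pvAll xs)[0]? with | some p => p.2 | none => (-1 : Int))) := rfl
  rw [hB]
  cases h0 : (pvAll xs)[0]? <;> cases h1 : (pvAll xs)[1]? <;> simp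

-- the change region, unfolded into the two constituent cases used by the proofs
def pvDold (xs : List Int) (r : Int) : Prop :=
  (xs ≠ [] ∧ (∀ c ∈ xs, c < 0) ∧ ¬(xs.length = 1 ∧ r = 0))
  ∨ (xs.countP (fun c => decide (0 ≤ c)) = 1 ∧ (∃ c ∈ xs, c < 0)
      ∧ 0 ≤ r ∧ r < (xs.length : Int) ∧ 0 ≤ xs[r.toNat]!)

lemma pvFilterElem (xs : List Int) (hcount : xs.countP (fun c => decide (0 ≤ c)) = 1) :
    ∃ (k : Nat), ∃ _ : k < xs.length, 0 ≤ xs[k] ∧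
      (PySem.List.enumerate xs 0).filter (fun p => p.2 > -1) = [((k : Int), xs[k])] := by
  have hlen : ((PySem.List.enumerate xs 0).filter (fun p => p.2 > -1)).length = 1 := by
    rw [← List.countP_eq_length_filter, pvCountAux, hcount]
  obtain ⟨z, hz⟩ := List.length_eq_one_iff.mp hlen
  have hzmem : z ∈ (PySem.List.enumerate xs 0).filter (fun p => p.2 > -1) := by
    rw [hz]; exact List.mem_cons_self
  rw [List.mem_filter] at hzmem
  obtain ⟨hze, hzpos⟩ := hzmem
  rw [PySem.List.mem_enumerate_iff] at hze
  obtain ⟨k, hk, rfl⟩ := hze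
  simp only [decide_eq_true_eq] at hzpos
  exact ⟨k, hk, by simp at hzpos ⊢; omega, by simpa using hz⟩

-- a refcol equal to EVERY nonnegative column index forces at most one nonnegative count
lemma pvAtMostOne (xs : List Int) (r : Int)
    (hall : ∀ k : Nat, k < xs.length → 0 ≤ xs[k]! → r = (k : Int)) :
    xs.countP (fun c => decide (0 ≤ c)) ≤ 1 := by
  by_contra hgt
  have hlen : 2 ≤ ((PySem.List.enumerate xs 0).filter (fun p => p.2 > -1)).length := by
    rw [← List.countP_eq_length_filter, pvCountAux]
    omega
  have hpw : ((PySem.List.enumerate xs 0).filter (fun p => p.2 > -1)).Pairwise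
      (fun p q => p.1 < q.1) :=
    List.Pairwise.sublist List.filter_sublist (PySem.List.pairwise_lt_enumerate xs 0)
  have hall' : ∀ z ∈ (PySem.List.enumerate xs 0).filter (fun p => p.2 > -1), r = z.1 := by
    intro z hz
    rw [List.mem_filter] at hz
    obtain ⟨hze, hzpos⟩ := hz
    rw [PySem.List.mem_enumerate_iff] at hze
    obtain ⟨k, hk, rfl⟩ := hze
    have hr := hall k hk (by
      rw [List.getElem!_eq_getElem?_getD, List.getElem?_eq_getElem hk]
      simp at hzpos ⊢
      omega)
    simpa using hr
  cases hF : (PySem.List.enumerate xs 0).filter (fun p => p.2 > -1) with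
  | nil => rw [hF] at hlen; simp at hlen
  | cons z0 t =>
    cases hT : t with
    | nil => rw [hF, hT] at hlen; simp at hlen
    | cons z1 rest =>
      rw [hF, hT] at hpw
      have hlt : z0.1 < z1.1 := (List.pairwise_cons.mp hpw).1 z1 (by simp)
      have h0 := hall' z0 (by rw [hF, hT]; exact List.mem_cons_self)
      have h1 := hall' z1 (by rw [hF, hT]; simp)
      omega

lemma pvD_iff (xs : List Int) (r : Int) : D_get_alt_col xs r ↔ pvDold xs r := by
  unfold D_get_alt_col pvDold
  constructor
  · rintro ⟨⟨c, hc, hcneg⟩, hall, hnot⟩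
    rcases Nat.le_one_iff_eq_zero_or_eq_one.mp (pvAtMostOne xs r hall) with h0 | h1
    · refine Or.inl ⟨fun h => by subst h; simp at hc, ?_, hnot⟩
      intro d hd
      have := List.countP_eq_zero.mp h0 d hd
      simp at this
      omega
    · obtain ⟨k, hk, hkpos, _⟩ := pvFilterElem xs h1
      have hrk := hall k hk (by
        rw [List.getElem!_eq_getElem?_getD, List.getElem?_eq_getElem hk]; simpa using hkpos)
      refine Or.inr ⟨h1, ⟨c, hc, hcneg⟩, by omega, by omega, ?_⟩
      rw [hrk, Int.toNat_natCast, List.getElem!_eq_getElem?_getD, List.getElem?_eq_getElem hk]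
      simpa using hkpos
  · rintro (⟨hne, hall, hnot⟩ | ⟨hcount, hneg, hr0, hrlt, hrpos⟩)
    · refine ⟨?_, ?_, hnot⟩
      · cases hxs : xs with
        | nil => exact absurd hxs hne
        | cons y ys => exact ⟨y, by simp, hall y (by rw [hxs]; exact List.mem_cons_self)⟩
      · intro k hk hkpos
        have := hall xs[k] (by simp)
        rw [List.getElem!_eq_getElem?_getD, List.getElem?_eq_getElem hk] at hkpos
        simp at hkpos
        omega
    · obtain ⟨k, hk, hkpos, hfil⟩ := pvFilterElem xs hcount
      have hrtn : r.toNat < xs.length := by omega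
      have hrpos' : 0 ≤ xs[r.toNat] := by
        rw [List.getElem!_eq_getElem?_getD, List.getElem?_eq_getElem hrtn] at hrpos
        simpa using hrpos
      have hrk : r = (k : Int) := by
        have hmem : ((r.toNat : Int), xs[r.toNat]) ∈
            (PySem.List.enumerate xs 0).filter (fun p => p.2 > -1) := by
          rw [List.mem_filter]
          refine ⟨?_, by simp; omega⟩
          rw [PySem.List.mem_enumerate_iff]
          exact ⟨r.toNat, hrtn, by simp⟩
        rw [hfil] at hmem
        simp only [List.mem_singleton, Prod.mk.injEq] at hmem
        omega
      refine ⟨hneg, ?_, ?_⟩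
      · intro j hj hjpos
        have hjpos' : 0 ≤ xs[j] := by
          rw [List.getElem!_eq_getElem?_getD, List.getElem?_eq_getElem hj] at hjpos
          simpa using hjpos
        have hmem : ((j : Int), xs[j]) ∈
            (PySem.List.enumerate xs 0).filter (fun p => p.2 > -1) := by
          rw [List.mem_filter]
          refine ⟨?_, by simp; omega⟩
          rw [PySem.List.mem_enumerate_iff]
          exact ⟨j, hj, by simp⟩
        rw [hfil] at hmem
        simp only [List.mem_singleton, Prod.mk.injEq] at hmem
        omega
      · rintro ⟨h1, rfl⟩
        obtain ⟨c, hc, hcneg⟩ := hneg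
        obtain ⟨x, hx⟩ := List.length_eq_one_iff.mp h1
        rw [hx] at hc hrpos
        simp at hc hrpos
        subst hc
        omega

lemma pvUnchanged (xs : List Int) (r : Int) (hD : ¬ D_get_alt_col xs r) :
    get_alt_col xs r = get_alt_col_alt xs r := by
  rw [pvD_iff] at hD
  rw [pvA_eq, pvB_eq, pvAll_split]
  unfold pvDold at hD
  push Not at hD
  obtain ⟨hD1, hD2⟩ := hD
  cases hL : pvSorted xs with
  | cons a t =>
    cases ht : t with
    | cons b t' => simp
    | nil =>
      -- exactly one qualifying column
      have hcount : xs.countP (fun c => decide (0 ≤ c)) = 1 := by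
        have := pvSorted_length xs
        rw [hL, ht] at this
        simpa using this.symm
      cases hN : pvNegSorted xs with
      | nil => simp
      | cons q N' =>
        -- some column is negative, so if r named the head index, D_ would hold
        have hneg : ∃ c ∈ xs, c < 0 := by
          by_contra hc
          push Not at hc
          have := (pvNegSorted_eq_nil_iff xs).mpr (fun c hcm => by have := hc c hcm; omega)
          rw [hN] at this
          simp at this
        obtain ⟨k, hk, hak, hpos⟩ := mem_pvSorted_exists xs a (by rw [hL]; exact List.mem_cons_self)
        have hr : r ≠ a.2 := by
          intro hr
          rcases hD2 hcount hneg (by rw [hr, hak]; simp) (by rw [hr, hak]; simp; omega) with h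
          rw [hr, hak] at h
          simp only [Int.toNat_natCast] at h
          rw [List.getElem!_eq_getElem?_getD, List.getElem?_eq_getElem hk] at h
          simp at h
          omega
        simp [show a.2 ≠ r from fun h => hr h.symm]
  | nil =>
    -- no qualifying column: every count is negative
    have hcount : xs.countP (fun c => decide (0 ≤ c)) = 0 := by
      have := pvSorted_length xs
      rw [hL] at this
      simpa using this.symm
    have hallneg : ∀ c ∈ xs, c < 0 := by
      intro c hc
      by_contra h
      have := List.countP_eq_zero.mp hcount c hc
      simp at this
      omega
    cases hN : pvNegSorted xs with
    | nil =>
      have hxs : xs = [] := by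
        cases hxs : xs with
        | nil => rfl
        | cons y ys =>
          have hy := hallneg y (by rw [hxs]; exact List.mem_cons_self)
          have := (pvNegSorted_eq_nil_iff xs).mp hN y (by rw [hxs]; exact List.mem_cons_self)
          omega
      simp
    | cons q N' =>
      have hxs : xs ≠ [] := by
        intro hxs
        rw [hxs] at hN
        have h2 : ([] : List (Int × Int)) = q :: N' := hN
        simp at h2
      obtain ⟨hlen1, hr0⟩ := hD1 hxs hallneg
      -- xs = [x]: N is the single pair (x, 0) and both sides return -1
      have hNlen : (q :: N').length = 1 := by
        have h1 := pvAll_length xs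
        rw [pvAll_split, hL, hN, hlen1] at h1
        simpa using h1
      have hN' : N' = [] := by
        simp at hNlen
        exact hNlen
      have hq2 : q.2 = 0 := by
        have := mem_pvNegSorted xs q (by rw [hN]; exact List.mem_cons_self)
        rw [hlen1] at this
        omega
      subst hN' hr0
      simp [hq2]

lemma pvExact (xs : List Int) (r : Int) (hD : D_get_alt_col xs r) :
    get_alt_col xs r ≠ get_alt_col_alt xs r := by
  rw [pvD_iff] at hD
  rw [pvA_eq, pvB_eq, pvAll_split]
  unfold pvDold at hD
  rcases hD with ⟨hne, hallneg, hnot1⟩ | ⟨hcount, hneg, hr0, hrlt, hrpos⟩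
  · -- all counts negative: A returns -1, B returns a column index ≥ 0
    have hL : pvSorted xs = [] := by
      have h0 : xs.countP (fun c => decide (0 ≤ c)) = 0 := by
        apply List.countP_eq_zero.mpr
        intro c hc
        have := hallneg c hc
        simp
        omega
      have := pvSorted_length xs
      rw [h0] at this
      exact List.length_eq_zero_iff.mp this
    rw [hL]
    cases hN : pvNegSorted xs with
    | nil =>
      exfalso
      cases hxs : xs with
      | nil => exact hne hxs
      | cons y ys =>
        have := (pvNegSorted_eq_nil_iff xs).mp hN y (by rw [hxs]; exact List.mem_cons_self)
        have := hallneg y (by rw [hxs]; exact List.mem_cons_self)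
        omega
    | cons q N' =>
      obtain ⟨hq1, hq2, hq3⟩ := mem_pvNegSorted xs q (by rw [hN]; exact List.mem_cons_self)
      by_cases hqr : q.2 = r
      · -- B returns the second column; xs has at least two columns
        have hxslen : 1 < xs.length := by
          by_contra h
          push Not at h
          have h0 : xs.length ≠ 0 := fun h0 => hne (List.length_eq_zero_iff.mp h0)
          have h1 : xs.length = 1 := by omega
          exact hnot1 ⟨h1, by omega⟩
        have hNlen : 1 < (q :: N').length := by
          have h1 := pvAll_length xs
          rw [pvAll_split, hL, hN] at h1
          simp only [List.nil_append, List.length_cons] at h1 ⊢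
          omega
        cases hN'' : N' with
        | nil => rw [hN''] at hNlen; simp at hNlen
        | cons q2 N2 =>
          obtain ⟨hb1, hb2, hb3⟩ := mem_pvNegSorted xs q2 (by rw [hN, hN'']; simp)
          simp [hqr]
          omega
      · simp [hqr]
        omega
  · -- exactly one qualifying column, named by refcol, plus a negative column:
    -- A returns -1, B returns the best negative column index ≥ 0
    have hL : ∃ a, pvSorted xs = [a] := by
      have := pvSorted_length xs
      rw [hcount] at this
      exact List.length_eq_one_iff.mp this
    obtain ⟨a, hL⟩ := hL
    have hN : pvNegSorted xs ≠ [] := by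
      intro hN
      obtain ⟨c, hc, hcneg⟩ := hneg
      have := (pvNegSorted_eq_nil_iff xs).mp hN c hc
      omega
    cases hNc : pvNegSorted xs with
    | nil => exact absurd hNc hN
    | cons q N' =>
      obtain ⟨hq1, hq2, hq3⟩ := mem_pvNegSorted xs q (by rw [hNc]; exact List.mem_cons_self)
      have har : a.2 = r := by
        have hk : r.toNat < xs.length := by omega
        have hpos : 0 ≤ xs[r.toNat] := by
          rw [List.getElem!_eq_getElem?_getD, List.getElem?_eq_getElem hk] at hrpos
          simpa using hrpos
        have := pvUnique xs a (by rw [hL]; exact List.mem_cons_self) hcount r.toNat hk hpos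
        rw [this]
        omega
      rw [hL]
      simp [har]
      omega

-- ===== VERDICT (by name: the statement is the Claim_ definition above) =====
theorem get_alt_col_spec : Claim_unchanged_get_alt_col := by
  intro colcounts refcol _ hD
  exact pvUnchanged colcounts refcol hD

theorem get_alt_col_changed : Claim_changed_get_alt_col := by
  unfold Claim_changed_get_alt_col; decide

theorem get_alt_col_tight : Claim_exact_get_alt_col := by
  intro colcounts refcol _ hD
  exact pvExact colcounts refcol hD
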